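-- pv_equiv track=rewrite | github.com/hjhjw1991/leetcode | python/174_Dungeon_Game_recursive.py | minHP
-- ===== SOURCE A (Python) =====
-- def minHP(list):
--     sum = 0
--     HP = 0
--     for cell in list:
--         sum += cell
--         if sum < 0:
--             HP += sum
--             sum = 0
--     return -HP
-- ===== SOURCE B (Python) =====
-- def minHP(list):
--     # Backwards scan: best is the minimal (most negative) total achievable over
--     # prefixes of the current suffix, via the recurrence best = min(0, cell + best).
--     best = 0
--     for cell in reversed(list):
--         best = min(0, cell + best)
--     return -best
-- ===== Notes on version B (the rewrite author's own statement) =====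
-- stated objective: alternative
-- what changed: B traverses the list backwards with the suffix recurrence best = min(0, cell + best) (the classic dungeon-game DP), instead of A's forward pass with a clamped-to-zero accumulator and a banked deficit.
import Mathlib
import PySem

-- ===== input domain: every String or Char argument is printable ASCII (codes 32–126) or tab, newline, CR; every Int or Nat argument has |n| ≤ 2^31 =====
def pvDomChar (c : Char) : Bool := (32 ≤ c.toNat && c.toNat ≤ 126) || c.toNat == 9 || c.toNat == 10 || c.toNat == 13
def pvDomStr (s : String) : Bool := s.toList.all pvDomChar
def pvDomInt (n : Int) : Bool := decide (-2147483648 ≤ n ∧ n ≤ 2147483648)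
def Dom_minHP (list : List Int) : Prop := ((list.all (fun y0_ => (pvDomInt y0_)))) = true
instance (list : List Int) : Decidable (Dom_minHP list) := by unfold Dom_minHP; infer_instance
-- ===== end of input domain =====

-- ===== PORT A =====
-- One honest line: B is a backwards scan with the suffix recurrence best = min(0, cell + best)
-- (the classic dungeon-game DP), instead of A's forward clamp-to-zero accumulator with a banked deficit.
def minHP (list : List Int) : Int :=
  let st := list.foldl (fun (p : Int × Int) cell =>
    let sum := p.1 + cell
    if sum < 0 then (0, p.2 + sum) else (sum, p.2)) (0, 0);
  -st.2

-- ===== PORT B =====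
-- 'for cell in reversed(list)' = foldl over list.reverse; min 0 (cell + best) is Python's min(0, cell+best).
def minHP_alt (list : List Int) : Int :=
  let best := list.reverse.foldl (fun (best : Int) cell => min 0 (cell + best)) 0;
  -best

-- ===== PRECONDITION & SPEC =====
def Spec_minHP (list : List Int) (out : Int) : Prop := out = minHP_alt list
instance (list : List Int) (out : Int) : Decidable (Spec_minHP list out) := by unfold Spec_minHP; infer_instance

-- ===== CLAIM (what is proved, stated in full; the proofs are below) =====
def Claim_equal_minHP : Prop := ∀ (list : List Int), Dom_minHP list → Spec_minHP list (minHP list)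

-- ===== LEMMAS AND PROOFS =====
-- g l = minimum over all prefixes p of l of the sum of p (the empty prefix gives 0);
-- B's reversed foldl computes g; A's fold returns HP + min 0 (sum + g l) in its second component.
def pvG (l : List Int) : Int := l.foldr (fun c b => min 0 (c + b)) 0

theorem pvG_nonpos (l : List Int) : pvG l ≤ 0 := by
  cases l with
  | nil => simp [pvG]
  | cons c t => simp [pvG]

theorem minHP_alt_eq_g (l : List Int) : minHP_alt l = -pvG l := by
  simp only [minHP_alt, pvG, List.foldl_reverse]

theorem minHP_A_fold (l : List Int) (sum HP : Int) (h : 0 ≤ sum) :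
    (l.foldl (fun (p : Int × Int) cell =>
      let s := p.1 + cell
      if s < 0 then (0, p.2 + s) else (s, p.2)) (sum, HP)).2 = HP + min 0 (sum + pvG l) := by
  induction l generalizing sum HP with
  | nil => simp [pvG]; omega
  | cons c t ih =>
    have hg := pvG_nonpos t
    simp only [pvG] at hg
    simp only [List.foldl_cons, pvG, List.foldr_cons]
    by_cases hc : sum + c < 0
    · simp only [if_pos hc]
      have := ih 0 (HP + (sum + c)) le_rfl
      simp only [pvG] at this
      rw [this]
      omega
    · simp only [if_neg hc]
      have := ih (sum + c) HP (by omega)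
      simp only [pvG] at this
      rw [this]
      omega

-- ===== VERDICT (by name: the statement is the Claim_ definition above) =====
theorem minHP_spec : Claim_equal_minHP := by
  intro l _
  unfold Spec_minHP minHP
  rw [minHP_alt_eq_g]
  have := minHP_A_fold l 0 0 le_rfl
  simp only [zero_add] at this
  simp only [this]
  have := pvG_nonpos l
  omega
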